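-- pv_equiv track=rewrite | github.com/Stitch3377/CodePath-TIP102 | session6.py | merge_schedules
-- ===== SOURCE A (Python) =====
-- def merge_schedules(schedule1, schedule2):
--     """Problem 5"""
--     pointer1 = 0
--     pointer2 = 0
--     result = ""
--
--     while pointer1 < len(schedule1) and pointer2 < len(schedule2):
--         result += schedule1[pointer1]
--         result += schedule2[pointer2]
--         pointer1 += 1
--         pointer2 += 1
--     while pointer1 < len(schedule1):
--         result += schedule1[pointer1]
--         pointer1 += 1
--     while pointer2 < len(schedule2):
--         result += schedule2[pointer2]
--         pointer2 += 1
--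
--     return result
-- ===== SOURCE B (Python) =====
-- def merge_schedules(schedule1, schedule2):
--     """Problem 5 - one loop that swaps the roles of the two strings each step."""
--     result = ""
--     while schedule1:
--         result += schedule1[0]
--         schedule1, schedule2 = schedule2, schedule1[1:]
--     return result + schedule2
-- ===== Notes on version B (the rewrite author's own statement) =====
-- stated objective: simpler
-- what changed: Replaces A's three staged while loops (interleave phase plus two drain phases) with one loop that emits the head of the first string and swaps the two strings each iteration, so no pointers, no min, and no tail phases exist.
import Mathlib
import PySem

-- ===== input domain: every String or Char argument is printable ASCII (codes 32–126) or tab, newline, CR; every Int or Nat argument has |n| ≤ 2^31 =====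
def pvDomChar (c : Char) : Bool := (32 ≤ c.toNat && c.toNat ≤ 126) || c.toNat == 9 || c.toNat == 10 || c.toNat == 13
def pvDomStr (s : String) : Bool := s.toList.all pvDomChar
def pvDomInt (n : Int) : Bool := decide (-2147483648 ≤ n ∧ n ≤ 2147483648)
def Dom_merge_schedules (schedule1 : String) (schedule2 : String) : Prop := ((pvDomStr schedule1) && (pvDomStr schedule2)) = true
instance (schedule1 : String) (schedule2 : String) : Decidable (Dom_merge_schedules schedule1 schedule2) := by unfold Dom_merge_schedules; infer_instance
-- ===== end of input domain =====

-- B replaces A's three pointer-driven while loops with one loop that swaps the two strings each step (simpler decomposition).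


-- ===== PORT A =====
-- first while loop: both pointers in range, append one char from each, advance both
def mergeLoopBoth (l1 l2 : List Char) (p1 p2 : Nat) (res : List Char) :
    List Char × Nat × Nat :=
  if h : p1 < l1.length ∧ p2 < l2.length then
    mergeLoopBoth l1 l2 (p1 + 1) (p2 + 1) (res ++ [l1[p1], l2[p2]])
  else
    (res, p1, p2)
termination_by l1.length - p1
decreasing_by omega

-- second/third while loop: drain one string from its pointer
def mergeLoopTail (l : List Char) (p : Nat) (res : List Char) : List Char :=
  if h : p < l.length then
    mergeLoopTail l (p + 1) (res ++ [l[p]])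
  else
    res
termination_by l.length - p
decreasing_by omega

def merge_schedules (schedule1 : String) (schedule2 : String) : String :=
  let r := mergeLoopBoth schedule1.toList schedule2.toList 0 0 []
  String.mk (mergeLoopTail schedule2.toList r.2.2
              (mergeLoopTail schedule1.toList r.2.1 r.1))

-- ===== PORT B =====
-- Source B's single while loop: take the head of the first string, then swap the strings
def altLoop (l1 l2 res : List Char) : List Char :=
  match l1 with
  | [] => res ++ l2
  | a :: t1 => altLoop l2 t1 (res ++ [a])
termination_by l1.length + l2.length
decreasing_by simp; omega

def merge_schedules_alt (schedule1 : String) (schedule2 : String) : String :=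
  String.mk (altLoop schedule1.toList schedule2.toList [])

-- ===== PRECONDITION & SPEC =====
def Spec_merge_schedules (schedule1 : String) (schedule2 : String) (out : String) : Prop := out = merge_schedules_alt schedule1 schedule2
instance (schedule1 : String) (schedule2 : String) (out : String) : Decidable (Spec_merge_schedules schedule1 schedule2 out) := by unfold Spec_merge_schedules; infer_instance

-- ===== CLAIM (what is proved, stated in full; the proofs are below) =====
def Claim_equal_merge_schedules : Prop := ∀ (schedule1 : String) (schedule2 : String), Dom_merge_schedules schedule1 schedule2 → Spec_merge_schedules schedule1 schedule2 (merge_schedules schedule1 schedule2)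

-- ===== LEMMAS AND PROOFS =====

-- proof-side interleaving helper
def itl : List Char → List Char → List Char
  | [], l2 => l2
  | l1, [] => l1
  | a :: l1, b :: l2 => a :: b :: itl l1 l2

theorem mergeLoopTail_eq (l : List Char) (p : Nat) (res : List Char) :
    mergeLoopTail l p res = res ++ l.drop p := by
  induction p, res using mergeLoopTail.induct l with
  | case1 p res h ih =>
    rw [mergeLoopTail, dif_pos h, ih, List.drop_eq_getElem_cons h]
    simp
  | case2 p res h =>
    rw [mergeLoopTail, dif_neg h, List.drop_eq_nil_of_le (by omega)]
    simp

-- A's full body, from equal pointers, produces res ++ itl of the two tails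
theorem loopFull_eq (l1 l2 : List Char) (p : Nat) (res : List Char) :
    (fun r : List Char × Nat × Nat =>
        mergeLoopTail l2 r.2.2 (mergeLoopTail l1 r.2.1 r.1))
      (mergeLoopBoth l1 l2 p p res)
      = res ++ itl (l1.drop p) (l2.drop p) := by
  by_cases h : p < l1.length ∧ p < l2.length
  · rw [mergeLoopBoth, dif_pos h]
    rw [loopFull_eq l1 l2 (p + 1) (res ++ [l1[p], l2[p]])]
    rw [List.drop_eq_getElem_cons h.1, List.drop_eq_getElem_cons h.2, itl]
    simp
  · rw [mergeLoopBoth, dif_neg h]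
    simp only [mergeLoopTail_eq]
    rcases Nat.lt_or_ge p l1.length with h1 | h1
    · have h2 : l2.length ≤ p := by omega
      rw [List.drop_eq_nil_of_le h2]
      cases hd : l1.drop p with
      | nil => simp [itl]
      | cons c t => simp [itl]
    · rw [List.drop_eq_nil_of_le h1]
      simp [itl]
termination_by l1.length - p
decreasing_by omega

-- swapping rule for itl
theorem itl_cons (a : Char) (l1 l2 : List Char) :
    itl (a :: l1) l2 = a :: itl l2 l1 := by
  induction l2 generalizing a l1 with
  | nil => cases l1 <;> simp [itl]
  | cons b t2 ih =>
    cases l1 with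
    | nil => simp [itl]
    | cons c t1 => simp [itl, ih c t1]

-- B's swap loop computes itl
theorem altLoop_eq (l1 l2 res : List Char) :
    altLoop l1 l2 res = res ++ itl l1 l2 := by
  induction l1, l2, res using altLoop.induct with
  | case1 l2 res => simp [altLoop, itl]
  | case2 a t1 l2 res ih =>
    rw [altLoop, ih, itl_cons]
    simp

-- ===== VERDICT (by name: the statement is the Claim_ definition above) =====
theorem merge_schedules_spec : Claim_equal_merge_schedules := by
  intro s1 s2 _
  show merge_schedules s1 s2 = merge_schedules_alt s1 s2
  unfold merge_schedules merge_schedules_alt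
  have := loopFull_eq s1.toList s2.toList 0 []
  simp only at this ⊢
  rw [this, altLoop_eq]
  simp
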